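-- pv_equiv track=rewrite | github.com/meistro57/Transcripto | transcripto_batch.py | map_speakers_to_letters
-- ===== SOURCE A (Python) =====
-- def map_speakers_to_letters(segments):
--     mapping = {}
--     next_letter = ord("A")
--     for seg in segments:
--         raw = seg.get("speaker", "Unknown")
--         if raw not in mapping:
--             mapping[raw] = f"Speaker {chr(next_letter)}"
--             next_letter += 1
--         seg["speaker_label"] = mapping[raw]
--     return segments
-- ===== SOURCE B (Python) =====
-- def map_speakers_to_letters(segments):
--     # Positional formula, no mapping dict: a speaker's letter index is the
--     # number of distinct speakers that appear strictly before its first occurrence.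
--     raws = [seg.get("speaker", "Unknown") for seg in segments]
--     for seg, raw in zip(segments, raws):
--         idx = len(set(raws[:raws.index(raw)]))
--         seg["speaker_label"] = "Speaker " + chr(ord("A") + idx)
--     return segments
-- ===== Notes on version B (the rewrite author's own statement) =====
-- stated objective: alternative
-- what changed: A incrementally grows a speaker->letter dict while labelling; B builds no mapping at all: it computes each segment's letter index by a positional formula (number of distinct speakers before the speaker's first occurrence, via list.index and set on a prefix), trading the hash map for an O(n^2) index/scan scheme.
import Mathlib
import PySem

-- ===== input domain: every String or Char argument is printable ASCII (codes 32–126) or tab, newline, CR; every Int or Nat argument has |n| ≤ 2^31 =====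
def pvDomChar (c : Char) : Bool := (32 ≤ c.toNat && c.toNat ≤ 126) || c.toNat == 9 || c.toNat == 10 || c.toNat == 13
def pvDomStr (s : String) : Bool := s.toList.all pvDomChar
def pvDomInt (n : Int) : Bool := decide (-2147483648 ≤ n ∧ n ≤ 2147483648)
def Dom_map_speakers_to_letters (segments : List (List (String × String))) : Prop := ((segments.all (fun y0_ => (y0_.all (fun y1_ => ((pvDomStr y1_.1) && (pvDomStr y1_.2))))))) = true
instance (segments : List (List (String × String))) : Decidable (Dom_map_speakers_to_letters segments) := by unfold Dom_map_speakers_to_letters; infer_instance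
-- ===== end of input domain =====

-- B builds no speaker→letter mapping at all: each segment's letter index is computed by a
-- positional formula (distinct speakers before the speaker's first occurrence); same return
-- value, and like A it returns the mutated segments (the equivalence is about the return value).

-- f"Speaker {chr(n)}" (exact for 0 ≤ n, as here: n starts at ord('A') and only increases)
def pvSpeakerLabel (n : Int) : String := "Speaker " ++ String.singleton (Char.ofNat n.toNat)

-- ===== PORT A =====
def mapSpeakersGoA (mapping : PySem.Dict String String) (nextLetter : Int) :
    List (List (String × String)) → List (List (String × String))
  | [] => []
  | seg :: rest =>
    let raw := (PySem.Dict.mk seg).getD "speaker" "Unknown"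
    let st :=
      if (mapping.contains raw) = false then
        (mapping.insert raw (pvSpeakerLabel nextLetter), nextLetter + 1)
      else (mapping, nextLetter)
    -- mapping[raw]: the key is always present at this point (Python would raise KeyError otherwise)
    ((PySem.Dict.mk seg).insert "speaker_label" (st.1.getD raw "")).items
      :: mapSpeakersGoA st.1 st.2 rest

def map_speakers_to_letters (segments : List (List (String × String))) : List (List (String × String)) :=
  mapSpeakersGoA PySem.Dict.empty 65 segments

-- ===== PORT B =====
def map_speakers_to_letters_alt (segments : List (List (String × String))) : List (List (String × String)) :=
  let raws := segments.map (fun seg => (PySem.Dict.mk seg).getD "speaker" "Unknown")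
  (segments.zip raws).map (fun p =>
    -- raws.index(raw): raw ∈ raws by construction, so index? is some (ValueError unreachable)
    let first : Nat := (PySem.List.index? raws p.2).getD 0
    -- raws[:first] with a nonnegative index = take
    let idx : Nat := (PySem.Set.ofList (raws.take first)).length
    ((PySem.Dict.mk p.1).insert "speaker_label"
      ("Speaker " ++ String.singleton (Char.ofNat (65 + idx)))).items)

-- ===== PRECONDITION & SPEC =====
def Spec_map_speakers_to_letters (segments : List (List (String × String))) (out : List (List (String × String))) : Prop := out = map_speakers_to_letters_alt segments
instance (segments : List (List (String × String))) (out : List (List (String × String))) : Decidable (Spec_map_speakers_to_letters segments out) := by unfold Spec_map_speakers_to_letters; infer_instance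

-- ===== CLAIM (what is proved, stated in full; the proofs are below) =====
def Claim_equal_map_speakers_to_letters : Prop := ∀ (segments : List (List (String × String))), Dom_map_speakers_to_letters segments → Spec_map_speakers_to_letters segments (map_speakers_to_letters segments)

-- ===== LEMMAS AND PROOFS =====

-- the speaker of a segment dict
def pvRawOf (seg : List (String × String)) : String :=
  (PySem.Dict.mk seg).getD "speaker" "Unknown"

-- the mapping built from a list of distinct speakers, letters starting at 'A' = 65
def pvMapOf (seen : List String) : PySem.Dict String String :=
  PySem.Dict.ofList ((PySem.List.enumerate seen 65).map (fun p => (p.2, pvSpeakerLabel p.1)))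

theorem pvEnumerate_append_singleton (l : List String) (x : String) (s : Int) :
    PySem.List.enumerate (l ++ [x]) s = PySem.List.enumerate l s ++ [(s + l.length, x)] := by
  induction l generalizing s with
  | nil => simp [PySem.List.enumerate]
  | cons a t ih => simp [PySem.List.enumerate_cons, ih]; ring_nf

theorem pvDictOfList_append_singleton (l : List (String × String)) (p : String × String) :
    PySem.Dict.ofList (l ++ [p]) = (PySem.Dict.ofList l).insert p.1 p.2 := by
  simp [PySem.Dict.ofList, PySem.Dict.update]

theorem pvMapOf_append (seen : List String) (r : String) :
    pvMapOf (seen ++ [r]) = (pvMapOf seen).insert r (pvSpeakerLabel (65 + seen.length)) := by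
  simp [pvMapOf, pvEnumerate_append_singleton, pvDictOfList_append_singleton]

theorem pvContains_pvMapOf (seen : List String) (r : String) :
    (pvMapOf seen).contains r = decide (r ∈ seen) := by
  induction seen using List.reverseRecOn with
  | nil => simp [pvMapOf, PySem.Dict.ofList, PySem.Dict.update, PySem.List.enumerate]
  | append_singleton t y ih =>
    rw [pvMapOf_append]
    simp [PySem.Dict.contains_insert, ih]
    by_cases h : r = y <;> simp [h]

theorem pvGetD_pvMapOf_stable (tail : List String) (seen : List String) (r : String)
    (hr : r ∈ seen) (hnd : (seen ++ tail).Nodup) :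
    (pvMapOf (seen ++ tail)).getD r "" = (pvMapOf seen).getD r "" := by
  induction tail using List.reverseRecOn with
  | nil => simp
  | append_singleton t y ih =>
    have h2 : ((seen ++ t) ++ [y]).Nodup := by simpa [List.append_assoc] using hnd
    rw [List.nodup_append] at h2
    have hy : y ∉ seen ++ t := fun hmem => h2.2.2 y hmem y (by simp) rfl
    have hnd' : (seen ++ t).Nodup := h2.1
    rw [show seen ++ (t ++ [y]) = (seen ++ t) ++ [y] by simp, pvMapOf_append,
        PySem.Dict.getD_insert]
    have hne : r ≠ y := fun h => hy (h ▸ List.mem_append_left t hr)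
    simp [hne, ih hnd']

-- Set.update seen l only appends: it is seen followed by some tail
theorem pvUpdate_eq_append (l : List String) (seen : List String) :
    ∃ t, PySem.Set.update seen l = seen ++ t := by
  induction l generalizing seen with
  | nil => exact ⟨[], by simp [PySem.Set.update]⟩
  | cons x l ih =>
    rw [PySem.Set.update_cons]
    by_cases hx : x ∈ seen
    · rw [PySem.Set.add_of_mem hx]; exact ih seen
    · rw [PySem.Set.add_of_not_mem hx]
      obtain ⟨t, ht⟩ := ih (seen ++ [x])
      exact ⟨[x] ++ t, by simp [ht]⟩

theorem pvGetD_update (seen : List String) (l : List String) (r : String)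
    (hr : r ∈ seen) (hnd : seen.Nodup) :
    (pvMapOf (PySem.Set.update seen l)).getD r "" = (pvMapOf seen).getD r "" := by
  obtain ⟨t, ht⟩ := pvUpdate_eq_append l seen
  have hnd2 : (seen ++ t).Nodup := ht ▸ PySem.Set.nodup_update seen l hnd
  rw [ht]
  exact pvGetD_pvMapOf_stable t seen r hr hnd2

-- main invariant: A's loop, started from the mapping of the distinct speakers seen so far,
-- labels every remaining segment with the FULL mapping's value
theorem pvGoA_eq (rest : List (List (String × String))) :
    ∀ seen : List String, seen.Nodup →
      mapSpeakersGoA (pvMapOf seen) (65 + seen.length) rest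
      = rest.map (fun seg =>
          ((PySem.Dict.mk seg).insert "speaker_label"
            ((pvMapOf (PySem.Set.update seen (rest.map pvRawOf))).getD (pvRawOf seg) "")).items) := by
  induction rest with
  | nil => intro seen _; simp [mapSpeakersGoA]
  | cons seg rest ih =>
    intro seen hnd
    rw [mapSpeakersGoA]
    simp only [List.map_cons, PySem.Set.update_cons]
    by_cases hmem : pvRawOf seg ∈ seen
    · simp only [pvContains_pvMapOf, pvRawOf] at hmem ⊢
      simp only [hmem, decide_true]
      rw [if_neg (by simp)]
      rw [PySem.Set.add_of_mem hmem]
      rw [ih seen hnd]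
      congr 1
      rw [pvGetD_update seen (rest.map pvRawOf) _ hmem hnd]
    · simp only [pvContains_pvMapOf, pvRawOf] at hmem ⊢
      simp only [hmem, decide_false]
      simp only [if_true]
      rw [PySem.Set.add_of_not_mem hmem]
      have hnd' : (seen ++ [(PySem.Dict.mk seg).getD "speaker" "Unknown"]).Nodup := by
        rw [List.nodup_append]
        refine ⟨hnd, by simp, ?_⟩
        intro a ha b hb
        simp only [List.mem_singleton] at hb
        subst hb
        exact fun h => hmem (h ▸ ha)
      rw [← pvMapOf_append seen _]
      have hlen : 65 + (seen.length : Int) + 1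
          = 65 + ((seen ++ [(PySem.Dict.mk seg).getD "speaker" "Unknown"]).length : Int) := by
        simp; ring
      rw [hlen, ih _ hnd']
      congr 1
      rw [pvGetD_update (seen ++ [(PySem.Dict.mk seg).getD "speaker" "Unknown"]) (rest.map pvRawOf) _ (by simp) hnd']

-- zipping a list with its own map pairs each element with its image
theorem pvZipMap {α β γ : Type} (l : List α) (f : α → β) (g : α × β → γ) :
    (l.zip (l.map f)).map g = l.map (fun x => g (x, f x)) := by
  induction l with
  | nil => simp
  | cons a t ih => simp [ih]

-- the mapping's value at a speaker = letter for the number of distinct speakers before its first occurrence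
theorem pvMapOf_getD_first (pre suf : List String) (r : String) (hpre : r ∉ pre) :
    (pvMapOf (PySem.Set.ofList (pre ++ r :: suf))).getD r ""
      = pvSpeakerLabel (65 + (PySem.Set.ofList pre).length) := by
  have hset : PySem.Set.ofList (pre ++ r :: suf)
      = PySem.Set.update (PySem.Set.ofList pre ++ [r]) suf := by
    rw [PySem.Set.ofList_append, PySem.Set.update_cons,
        PySem.Set.add_of_not_mem (by simpa [PySem.Set.mem_ofList] using hpre)]
  have hnd1 : (PySem.Set.ofList pre ++ [r]).Nodup := by
    refine List.Nodup.append (PySem.Set.nodup_ofList pre) (by simp) ?_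
    intro a ha hb
    rw [List.mem_singleton] at hb
    rw [PySem.Set.mem_ofList] at ha
    exact hpre (hb ▸ ha)
  rw [hset, pvGetD_update (PySem.Set.ofList pre ++ [r]) suf r (by simp) hnd1,
      pvMapOf_append, PySem.Dict.getD_insert]
  simp

-- ===== VERDICT (by name: the statement is the Claim_ definition above) =====
theorem map_speakers_to_letters_spec : Claim_equal_map_speakers_to_letters := by
  intro segments _
  unfold Spec_map_speakers_to_letters map_speakers_to_letters map_speakers_to_letters_alt
  have h0 : PySem.Dict.empty = pvMapOf [] := by
    simp [pvMapOf, PySem.Dict.ofList, PySem.Dict.update, PySem.List.enumerate]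
  have h1 : (65 : Int) = 65 + ([] : List String).length := by simp
  rw [h0, h1, pvGoA_eq segments [] (by simp), pvZipMap]
  apply List.map_congr_left
  intro seg hseg
  have hmem : pvRawOf seg ∈ segments.map pvRawOf := List.mem_map.mpr ⟨seg, hseg, rfl⟩
  obtain ⟨k, hk⟩ := Option.isSome_iff_exists.mp ((PySem.List.index?_isSome_iff _ _).mpr hmem)
  obtain ⟨pre, suf, heq, hlen, hpre⟩ := (PySem.List.index?_eq_some_iff _ _ _).mp hk
  have htake : (segments.map pvRawOf).take k = pre := by rw [heq, ← hlen, List.take_left]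
  have hupd : PySem.Set.update [] (segments.map pvRawOf)
      = PySem.Set.ofList (pre ++ pvRawOf seg :: suf) := by
    rw [PySem.Set.update_nil_left, heq]
  show ((PySem.Dict.mk seg).insert "speaker_label"
        ((pvMapOf (PySem.Set.update [] (segments.map pvRawOf))).getD (pvRawOf seg) "")).items
     = ((PySem.Dict.mk seg).insert "speaker_label"
        ("Speaker " ++ String.singleton (Char.ofNat (65 +
           (PySem.Set.ofList ((segments.map pvRawOf).take
             ((PySem.List.index? (segments.map pvRawOf) (pvRawOf seg)).getD 0))).length)))).items
  rw [hupd, pvMapOf_getD_first pre suf (pvRawOf seg) hpre, hk]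
  simp only [Option.getD_some, htake]
  congr 2
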